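-- pv_equiv track=rewrite | github.com/Zakari21s/fyp-dissertation | src/clean_labeled_pipeline.py | build_canonical_schema
-- ===== SOURCE A (Python) =====
-- from typing import Dict, List, Optional, Set, Tuple, Any
--
-- def build_canonical_schema(union_columns: Set[str], required_columns: List[str]) -> List[str]:
--     """
--     Build canonical column ordering: required → labels → SMART features (sorted) → metadata.
--
--     Returns:
--         Ordered list of column names (no duplicates)
--     """
--     # Separate columns into categories
--     required_set = set(required_columns)
--     label_columns = sorted([col for col in union_columns if col.startswith('y_')])
--     smart_n_columns = sorted([col for col in union_columns if col.startswith('n_')])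
--     smart_r_columns = sorted([col for col in union_columns if col.startswith('r_')])
--     metadata_columns = sorted([col for col in union_columns
--                              if col not in required_set
--                              and not col.startswith('y_')
--                              and not col.startswith('n_')
--                              and not col.startswith('r_')])
--
--     # Build canonical order
--     canonical = []
--     seen = set()
--
--     # Required columns (in specified order, excluding labels which will be added separately)
--     for col in required_columns:
--         if col in union_columns and col not in seen:
--             if not col.startswith('y_'):  # Don't add label columns here, they'll be added next
--                 canonical.append(col)
--                 seen.add(col)
--
--     # Label columns (sorted) - includes y_7, y_14, y_30 from required_columns
--     for col in label_columns:
--         if col not in seen: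
--             canonical.append(col)
--             seen.add(col)
--
--     # SMART features (n_* then r_*)
--     for col in smart_n_columns:
--         if col not in seen:
--             canonical.append(col)
--             seen.add(col)
--
--     for col in smart_r_columns:
--         if col not in seen:
--             canonical.append(col)
--             seen.add(col)
--
--     # Metadata
--     for col in metadata_columns:
--         if col not in seen:
--             canonical.append(col)
--             seen.add(col)
--
--     return canonical
-- ===== SOURCE B (Python) =====
-- def build_canonical_schema(union_columns, required_columns):
--     """One keyed sort: required (by first position) < labels < n_* < r_* < metadata."""
--     L = len(required_columns)
--     required_set = set(required_columns)
--
--     def rank(col):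
--         if col.startswith('y_'):
--             return L
--         if col in required_set:
--             return required_columns.index(col)
--         if col.startswith('n_'):
--             return L + 1
--         if col.startswith('r_'):
--             return L + 2
--         return L + 3
--
--     return sorted(union_columns, key=lambda col: (rank(col), col))
-- ===== Notes on version B (the rewrite author's own statement) =====
-- stated objective: alternative
-- what changed: Replaces A's five categorize/sort/concatenate/dedup passes with one sort of union_columns under the key (rank, name), where rank is the required-column first position for non-label required columns and a constant per category (labels, n_*, r_*, metadata) otherwise.
import Mathlib
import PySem

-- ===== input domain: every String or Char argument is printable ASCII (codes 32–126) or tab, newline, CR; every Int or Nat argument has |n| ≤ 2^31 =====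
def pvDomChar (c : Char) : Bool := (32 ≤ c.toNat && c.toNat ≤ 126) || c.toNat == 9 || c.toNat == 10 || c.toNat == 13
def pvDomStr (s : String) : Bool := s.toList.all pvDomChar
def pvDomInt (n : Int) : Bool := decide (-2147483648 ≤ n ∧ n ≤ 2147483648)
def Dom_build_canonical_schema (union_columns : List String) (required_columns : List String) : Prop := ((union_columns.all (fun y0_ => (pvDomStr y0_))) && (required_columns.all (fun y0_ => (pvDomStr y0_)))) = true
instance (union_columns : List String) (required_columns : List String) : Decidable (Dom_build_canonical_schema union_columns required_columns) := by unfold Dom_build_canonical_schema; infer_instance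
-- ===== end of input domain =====

-- B replaces A's five categorize/sort/concatenate/dedup passes by one keyed sort (objective: alternative decomposition, same cost).

-- ===== PORT A =====
-- the 'if col not in seen: append+add' body shared by A's last four loops
def pvStep (cs : List String × PySem.Set String) (col : String) : List String × PySem.Set String :=
  if !PySem.Set.contains cs.2 col then (cs.1 ++ [col], PySem.Set.add cs.2 col) else cs

-- the body of A's first loop (over required_columns)
def pvStepReq (union_columns : List String) (cs : List String × PySem.Set String) (col : String) :
    List String × PySem.Set String :=
  if union_columns.contains col && !PySem.Set.contains cs.2 col then
    (if !PySem.Str.startswith col "y_" then (cs.1 ++ [col], PySem.Set.add cs.2 col) else cs)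
  else cs

def build_canonical_schema (union_columns : List String) (required_columns : List String) : List String :=
  let required_set : PySem.Set String := PySem.Set.ofList required_columns
  let label_columns := PySem.List.sorted (union_columns.filter (fun col => PySem.Str.startswith col "y_")) (fun col => col)
  let smart_n_columns := PySem.List.sorted (union_columns.filter (fun col => PySem.Str.startswith col "n_")) (fun col => col)
  let smart_r_columns := PySem.List.sorted (union_columns.filter (fun col => PySem.Str.startswith col "r_")) (fun col => col)
  let metadata_columns := PySem.List.sorted (union_columns.filter (fun col =>
      !PySem.Set.contains required_set col
      && !PySem.Str.startswith col "y_"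
      && !PySem.Str.startswith col "n_"
      && !PySem.Str.startswith col "r_")) (fun col => col)
  let st : List String × PySem.Set String := ([], PySem.Set.empty)
  let st := required_columns.foldl (pvStepReq union_columns) st
  let st := label_columns.foldl pvStep st
  let st := smart_n_columns.foldl pvStep st
  let st := smart_r_columns.foldl pvStep st
  let st := metadata_columns.foldl pvStep st
  st.1

-- ===== PORT B =====
-- 'required_columns.index(col)' is guarded by 'col in required_set', so the .getD 0 miss case is never taken
def build_canonical_schema_alt (union_columns : List String) (required_columns : List String) : List String :=
  let L : Int := PySem.List.len required_columns
  let required_set : PySem.Set String := PySem.Set.ofList required_columns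
  let rank : String → Int := fun col =>
    if PySem.Str.startswith col "y_" then L
    else if PySem.Set.contains required_set col then (((PySem.List.index? required_columns col).getD 0 : Nat) : Int)
    else if PySem.Str.startswith col "n_" then L + 1
    else if PySem.Str.startswith col "r_" then L + 2
    else L + 3
  PySem.List.sorted2 union_columns rank (fun col => col)

-- ===== PRECONDITION & SPEC =====
-- Python's union_columns is a set; Pre_ only requires the List String that models it to be the
-- type convention's duplicate-free representation (distinct elements); nothing else is excluded.
def Pre_build_canonical_schema (union_columns : List String) (required_columns : List String) : Prop :=
  union_columns.Nodup
instance (union_columns : List String) (required_columns : List String) : Decidable (Pre_build_canonical_schema union_columns required_columns) := by unfold Pre_build_canonical_schema; infer_instance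

def pvWitness_build_canonical_schema : List String × List String :=
  (["n_1", "meta", "y_7", "r_2", "id"], ["id", "y_7", "n_1"])

def Spec_build_canonical_schema (union_columns : List String) (required_columns : List String) (out : List String) : Prop := out = build_canonical_schema_alt union_columns required_columns
instance (union_columns : List String) (required_columns : List String) (out : List String) : Decidable (Spec_build_canonical_schema union_columns required_columns out) := by unfold Spec_build_canonical_schema; infer_instance

-- ===== CLAIM (what is proved, stated in full; the proofs are below) =====
def Claim_equal_build_canonical_schema : Prop := ∀ (union_columns : List String) (required_columns : List String), Dom_build_canonical_schema union_columns required_columns → Pre_build_canonical_schema union_columns required_columns → Spec_build_canonical_schema union_columns required_columns (build_canonical_schema union_columns required_columns)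

-- ===== LEMMAS AND PROOFS =====

-- B's sort key, as one lexicographic key
def pvRank (required_columns : List String) (col : String) : Int :=
  if PySem.Str.startswith col "y_" then PySem.List.len required_columns
  else if PySem.Set.contains (PySem.Set.ofList required_columns) col then
    (((PySem.List.index? required_columns col).getD 0 : Nat) : Int)
  else if PySem.Str.startswith col "n_" then PySem.List.len required_columns + 1
  else if PySem.Str.startswith col "r_" then PySem.List.len required_columns + 2
  else PySem.List.len required_columns + 3

def pvKey (required_columns : List String) (col : String) : Int ×ₗ String :=
  toLex (pvRank required_columns col, col)

-- the five segments of A's output and the successive 'seen' sets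
def pvS0 (u r : List String) : List String :=
  (PySem.Set.ofList r).filter (fun c => u.contains c && !PySem.Str.startswith c "y_")
def pvL1 (u : List String) : List String :=
  PySem.List.sorted (u.filter (fun c => PySem.Str.startswith c "y_")) (fun c => c)
def pvL2 (u : List String) : List String :=
  PySem.List.sorted (u.filter (fun c => PySem.Str.startswith c "n_")) (fun c => c)
def pvL3 (u : List String) : List String :=
  PySem.List.sorted (u.filter (fun c => PySem.Str.startswith c "r_")) (fun c => c)
def pvL4 (u r : List String) : List String :=
  PySem.List.sorted (u.filter (fun c =>
      !PySem.Set.contains (PySem.Set.ofList r) c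
      && !PySem.Str.startswith c "y_"
      && !PySem.Str.startswith c "n_"
      && !PySem.Str.startswith c "r_")) (fun c => c)
def pvs1 (u r : List String) : PySem.Set String := PySem.Set.update PySem.Set.empty (pvS0 u r)
def pvs2 (u r : List String) : PySem.Set String := PySem.Set.update (pvs1 u r) (pvL1 u)
def pvs3 (u r : List String) : PySem.Set String := PySem.Set.update (pvs2 u r) (pvL2 u)
def pvs4 (u r : List String) : PySem.Set String := PySem.Set.update (pvs3 u r) (pvL3 u)
def pvT (l : List String) (s : PySem.Set String) : List String :=
  l.filter (fun c => !PySem.Set.contains s c)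
def pvOut (u r : List String) : List String :=
  pvS0 u r ++ (pvT (pvL1 u) (pvs1 u r) ++ (pvT (pvL2 u) (pvs2 u r)
    ++ (pvT (pvL3 u) (pvs3 u r) ++ pvT (pvL4 u r) (pvs4 u r))))

lemma pv_sorted2_eq_sorted_lex {α : Type} (xs : List α) (k1 : α → Int) (k2 : α → String) :
    PySem.List.sorted2 xs k1 k2 = PySem.List.sorted xs (fun x => toLex (k1 x, k2 x)) := by
  rw [PySem.List.sorted_eq_foldl_insertBy]
  unfold PySem.List.sorted2
  have hb : (fun a b => decide (k1 a < k1 b) || (!decide (k1 b < k1 a) && decide (k2 a < k2 b)))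
      = (fun a b => decide (toLex (k1 a, k2 a) < toLex (k1 b, k2 b))) := by
    funext a b
    rw [Bool.eq_iff_iff]
    simp only [Bool.or_eq_true, Bool.and_eq_true, Bool.not_eq_true', decide_eq_true_eq,
      decide_eq_false_iff_not, Prod.Lex.toLex_lt_toLex]
    constructor
    · rintro (h | ⟨h1, h2⟩)
      · exact Or.inl h
      · rcases lt_trichotomy (k1 a) (k1 b) with h' | h' | h'
        · exact Or.inl h'
        · exact Or.inr ⟨h', h2⟩
        · exact absurd h' h1
    · rintro (h | ⟨h1, h2⟩)
      · exact Or.inl h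
      · exact Or.inr ⟨by rw [h1]; exact lt_irrefl _, h2⟩
  simp only [hb]
  simp

lemma pv_alt_eq (u r : List String) :
    build_canonical_schema_alt u r = PySem.List.sorted u (pvKey r) := by
  unfold build_canonical_schema_alt
  rw [pv_sorted2_eq_sorted_lex]
  rfl

lemma pv_contains_add (s : PySem.Set String) (x y : String) :
    PySem.Set.contains (PySem.Set.add s x) y = (PySem.Set.contains s y || y == x) := by
  rw [Bool.eq_iff_iff]
  simp only [Bool.or_eq_true, PySem.Set.contains_iff, PySem.Set.mem_add, beq_iff_eq]

lemma pv_filter_discard (l : List String) (x : String) (p : String → Bool) (hx : p x = false) :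
    (PySem.Set.discard l x).filter p = l.filter p := by
  unfold PySem.Set.discard
  rw [List.filter_filter]
  apply List.filter_congr
  intro a _
  by_cases h : a = x
  · subst h; simp [hx]
  · simp [h]

lemma pv_foldl_pvStep (xs : List String) (c : List String) (s : PySem.Set String) :
    xs.foldl pvStep (c, s) =
      (c ++ (PySem.Set.ofList xs).filter (fun x => !PySem.Set.contains s x), PySem.Set.update s xs) := by
  induction xs generalizing c s with
  | nil => simp [PySem.Set.update_nil, PySem.Set.ofList_nil]
  | cons x xs ih =>
    rw [List.foldl_cons, PySem.Set.update_cons, PySem.Set.ofList_cons]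
    by_cases hc : PySem.Set.contains s x = true
    · have hmem : x ∈ s := (PySem.Set.contains_iff s x).1 hc
      rw [show pvStep (c, s) x = (c, s) by simp [pvStep, hmem]]
      rw [PySem.Set.add_of_mem hmem, ih]
      rw [List.filter_cons_of_neg (by simp [hmem])]
      rw [pv_filter_discard _ _ _ (by simp [hmem])]
    · have hnm : x ∉ s := fun h => hc ((PySem.Set.contains_iff s x).2 h)
      rw [show pvStep (c, s) x = (c ++ [x], PySem.Set.add s x) by simp [pvStep, hnm]]
      rw [ih]
      rw [List.filter_cons_of_pos (by simp [hnm])]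
      have hfil : (PySem.Set.ofList xs).filter (fun y => !PySem.Set.contains (PySem.Set.add s x) y)
          = ((PySem.Set.ofList xs).discard x).filter (fun y => !PySem.Set.contains s y) := by
        unfold PySem.Set.discard
        rw [List.filter_filter]
        apply List.filter_congr
        intro a _
        rw [pv_contains_add]
        by_cases h : a = x
        · subst h; simp
        · simp [beq_eq_false_iff_ne.mpr h, Bool.and_comm]
      rw [hfil]
      simp

lemma pv_foldl_pvStepReq (u r : List String) (c : List String) (s : PySem.Set String) :
    r.foldl (pvStepReq u) (c, s) =
      (c ++ (PySem.Set.ofList r).filter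
          (fun col => u.contains col && !PySem.Set.contains s col && !PySem.Str.startswith col "y_"),
       PySem.Set.update s ((PySem.Set.ofList r).filter
          (fun col => u.contains col && !PySem.Set.contains s col && !PySem.Str.startswith col "y_"))) := by
  induction r generalizing c s with
  | nil => simp [PySem.Set.update_nil, PySem.Set.ofList_nil]
  | cons x r ih =>
    rw [List.foldl_cons, PySem.Set.ofList_cons, List.filter_cons]
    by_cases hp : (u.contains x && !PySem.Set.contains s x && !PySem.Str.startswith x "y_") = true
    · have hp' := hp
      simp only [Bool.and_eq_true, Bool.not_eq_true'] at hp'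
      obtain ⟨⟨h1, h2⟩, h3⟩ := hp'
      have hnm : x ∉ s := fun h => by rw [(PySem.Set.contains_iff s x).2 h] at h2; cases h2
      have hstep : pvStepReq u (c, s) x = (c ++ [x], PySem.Set.add s x) := by
        unfold pvStepReq
        rw [h1, h2, h3]
        rfl
      rw [hstep, ih, hp, if_pos rfl]
      have hfil : (PySem.Set.ofList r).filter
            (fun col => u.contains col && !PySem.Set.contains (PySem.Set.add s x) col && !PySem.Str.startswith col "y_")
          = ((PySem.Set.ofList r).discard x).filter
            (fun col => u.contains col && !PySem.Set.contains s col && !PySem.Str.startswith col "y_") := by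
        unfold PySem.Set.discard
        rw [List.filter_filter]
        apply List.filter_congr
        intro a _
        rw [pv_contains_add]
        by_cases h : a = x
        · subst h; simp
        · rw [beq_eq_false_iff_ne.mpr h]
          cases u.contains a <;> cases PySem.Set.contains s a <;>
            cases PySem.Str.startswith a "y_" <;> rfl
      rw [hfil, PySem.Set.update_cons, List.append_assoc]
      rfl
    · have hpf : (u.contains x && !PySem.Set.contains s x && !PySem.Str.startswith x "y_") = false :=
        Bool.eq_false_iff.mpr hp
      have hstep : pvStepReq u (c, s) x = (c, s) := by
        unfold pvStepReq
        by_cases hq : (u.contains x && !PySem.Set.contains s x) = true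
        · have h3 : (!PySem.Str.startswith x "y_") = false := by
            cases hy : (!PySem.Str.startswith x "y_")
            · rfl
            · rw [hq, hy] at hpf; cases hpf
          rw [hq, if_pos rfl, h3]
          rfl
        · rw [Bool.eq_false_iff.mpr hq]
          rfl
      rw [hstep, ih, hpf, if_neg (by simp)]
      rw [pv_filter_discard _ _ _ hpf]

lemma pv_startswith_exclusive (c : String) (a b : Char) (hab : a ≠ b)
    (h1 : PySem.Str.startswith c (String.ofList [a, '_']) = true)
    (h2 : PySem.Str.startswith c (String.ofList [b, '_']) = true) : False := by
  rw [PySem.Str.startswith_eq, PySem.Chars.startswith_iff] at h1 h2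
  simp at h1 h2
  rcases h1 with ⟨t1, ht1⟩
  rcases h2 with ⟨t2, ht2⟩
  rw [← ht1] at ht2
  simp at ht2
  exact hab ht2.1.symm

lemma pv_pairwise_index_ofList (r : List String) :
    (PySem.Set.ofList r).Pairwise
      (fun a b => ((PySem.List.index? r a).getD 0) < ((PySem.List.index? r b).getD 0)) := by
  induction r with
  | nil => simp [PySem.Set.ofList_nil]
  | cons x r ih =>
    rw [PySem.Set.ofList_cons]
    constructor
    · intro b hb
      rcases (PySem.Set.mem_discard _ _ _).1 hb with ⟨hbr, hbx⟩
      have hbm : b ∈ r := (PySem.Set.mem_ofList r b).1 hbr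
      rcases Option.isSome_iff_exists.1 ((PySem.List.index?_isSome_iff r b).2 hbm) with ⟨k, hk⟩
      rw [PySem.List.index?_cons_self, PySem.List.index?_cons_of_ne _ (Ne.symm hbx), hk]
      simp
    · have hsub : List.Sublist ((PySem.Set.ofList r).discard x) (PySem.Set.ofList r) := by
        unfold PySem.Set.discard; exact List.filter_sublist
      apply (ih.sublist hsub).imp_of_mem
      intro a b ha hb hab
      have hax : a ≠ x := ((PySem.Set.mem_discard _ _ _).1 ha).2
      have hbx : b ≠ x := ((PySem.Set.mem_discard _ _ _).1 hb).2
      have ham : a ∈ r := (PySem.Set.mem_ofList r a).1 ((PySem.Set.mem_discard _ _ _).1 ha).1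
      have hbm : b ∈ r := (PySem.Set.mem_ofList r b).1 ((PySem.Set.mem_discard _ _ _).1 hb).1
      rcases Option.isSome_iff_exists.1 ((PySem.List.index?_isSome_iff r a).2 ham) with ⟨j, hj⟩
      rcases Option.isSome_iff_exists.1 ((PySem.List.index?_isSome_iff r b).2 hbm) with ⟨k, hk⟩
      rw [PySem.List.index?_cons_of_ne _ (Ne.symm hax), PySem.List.index?_cons_of_ne _ (Ne.symm hbx), hj, hk]
      rw [hj, hk] at hab
      simpa using hab

lemma pv_index_lt_length (r : List String) (c : String) (hc : c ∈ r) :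
    ((PySem.List.index? r c).getD 0) < r.length := by
  rcases Option.isSome_iff_exists.1 ((PySem.List.index?_isSome_iff r c).2 hc) with ⟨k, hk⟩
  rcases (PySem.List.index?_eq_some_iff r c k).1 hk with ⟨pre, suf, hr, hl, -⟩
  rw [hk]
  simp [hr, ← hl]

lemma pv_A_eq (u r : List String) (hu : u.Nodup) :
    build_canonical_schema u r = pvOut u r := by
  have hA : build_canonical_schema u r =
      (List.foldl pvStep (List.foldl pvStep (List.foldl pvStep (List.foldl pvStep
        (List.foldl (pvStepReq u) (([] : List String), (PySem.Set.empty : PySem.Set String)) r)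
        (pvL1 u)) (pvL2 u)) (pvL3 u)) (pvL4 u r)).1 := rfl
  have hD0 : (PySem.Set.ofList r).filter
      (fun col => u.contains col && !PySem.Set.contains PySem.Set.empty col && !PySem.Str.startswith col "y_")
      = pvS0 u r := by
    unfold pvS0
    apply List.filter_congr
    intro a _
    have he : PySem.Set.contains (PySem.Set.empty : PySem.Set String) a = false := by
      rw [Bool.eq_false_iff]
      intro h
      have := (PySem.Set.contains_iff _ _).1 h
      rw [PySem.Set.empty_eq] at this
      exact absurd this (List.not_mem_nil)
    rw [he]
    cases u.contains a <;> cases PySem.Str.startswith a "y_" <;> rfl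
  have hof : ∀ xs : List String, xs.Nodup → PySem.Set.ofList xs = xs :=
    fun xs h => PySem.Set.ofList_eq_self_of_nodup xs h
  have hn1 : (pvL1 u).Nodup :=
    ((PySem.List.sorted_perm _ _ _).nodup_iff).2 (hu.filter _)
  have hn2 : (pvL2 u).Nodup :=
    ((PySem.List.sorted_perm _ _ _).nodup_iff).2 (hu.filter _)
  have hn3 : (pvL3 u).Nodup :=
    ((PySem.List.sorted_perm _ _ _).nodup_iff).2 (hu.filter _)
  have hn4 : (pvL4 u r).Nodup :=
    ((PySem.List.sorted_perm _ _ _).nodup_iff).2 (hu.filter _)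
  rw [hA]
  simp only [pv_foldl_pvStepReq, pv_foldl_pvStep, hD0, hof _ hn1, hof _ hn2, hof _ hn3, hof _ hn4]
  unfold pvOut pvT pvs4 pvs3 pvs2 pvs1
  simp only [List.append_assoc, List.nil_append]

lemma pv_mem_S0 (u r : List String) (c : String) :
    c ∈ pvS0 u r ↔ c ∈ r ∧ c ∈ u ∧ PySem.Str.startswith c "y_" = false := by
  unfold pvS0
  simp [List.mem_filter, PySem.Set.mem_ofList]

lemma pv_mem_L1 (u : List String) (c : String) :
    c ∈ pvL1 u ↔ c ∈ u ∧ PySem.Str.startswith c "y_" = true := by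
  unfold pvL1
  rw [PySem.List.mem_sorted]
  simp [List.mem_filter]

lemma pv_mem_L2 (u : List String) (c : String) :
    c ∈ pvL2 u ↔ c ∈ u ∧ PySem.Str.startswith c "n_" = true := by
  unfold pvL2
  rw [PySem.List.mem_sorted]
  simp [List.mem_filter]

lemma pv_mem_L3 (u : List String) (c : String) :
    c ∈ pvL3 u ↔ c ∈ u ∧ PySem.Str.startswith c "r_" = true := by
  unfold pvL3
  rw [PySem.List.mem_sorted]
  simp [List.mem_filter]

lemma pv_mem_L4 (u r : List String) (c : String) :
    c ∈ pvL4 u r ↔ c ∈ u ∧ c ∉ r ∧ PySem.Str.startswith c "y_" = false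
      ∧ PySem.Str.startswith c "n_" = false ∧ PySem.Str.startswith c "r_" = false := by
  unfold pvL4
  rw [PySem.List.mem_sorted]
  simp [List.mem_filter, PySem.Set.mem_ofList]
  tauto

lemma pv_mem_s1 (u r : List String) (c : String) :
    c ∈ pvs1 u r ↔ c ∈ pvS0 u r := by
  unfold pvs1
  rw [PySem.Set.mem_update]
  simp [PySem.Set.empty_eq]

lemma pv_mem_s2 (u r : List String) (c : String) :
    c ∈ pvs2 u r ↔ c ∈ pvS0 u r ∨ c ∈ pvL1 u := by
  unfold pvs2
  rw [PySem.Set.mem_update, pv_mem_s1]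

lemma pv_mem_s3 (u r : List String) (c : String) :
    c ∈ pvs3 u r ↔ (c ∈ pvS0 u r ∨ c ∈ pvL1 u) ∨ c ∈ pvL2 u := by
  unfold pvs3
  rw [PySem.Set.mem_update, pv_mem_s2]

lemma pv_mem_s4 (u r : List String) (c : String) :
    c ∈ pvs4 u r ↔ ((c ∈ pvS0 u r ∨ c ∈ pvL1 u) ∨ c ∈ pvL2 u) ∨ c ∈ pvL3 u := by
  unfold pvs4
  rw [PySem.Set.mem_update, pv_mem_s3]

lemma pv_mem_T (l : List String) (s : PySem.Set String) (c : String) :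
    c ∈ pvT l s ↔ c ∈ l ∧ c ∉ s := by
  unfold pvT
  simp [List.mem_filter, PySem.Set.contains_iff]

lemma pv_mem_out (u r : List String) (c : String) :
    c ∈ pvOut u r ↔ c ∈ u := by
  unfold pvOut
  simp only [List.mem_append, pv_mem_T, pv_mem_s1, pv_mem_s2, pv_mem_s3, pv_mem_s4]
  constructor
  · rintro (h | ⟨h, -⟩ | ⟨h, -⟩ | ⟨h, -⟩ | ⟨h, -⟩)
    · exact ((pv_mem_S0 u r c).1 h).2.1
    · exact ((pv_mem_L1 u c).1 h).1
    · exact ((pv_mem_L2 u c).1 h).1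
    · exact ((pv_mem_L3 u c).1 h).1
    · exact ((pv_mem_L4 u r c).1 h).1
  · intro hcu
    by_cases hy : PySem.Str.startswith c "y_" = true
    · refine Or.inr (Or.inl ⟨(pv_mem_L1 u c).2 ⟨hcu, hy⟩, fun hS0 => ?_⟩)
      rw [((pv_mem_S0 u r c).1 hS0).2.2] at hy
      cases hy
    · have hy' : PySem.Str.startswith c "y_" = false := Bool.eq_false_iff.mpr hy
      by_cases hcr : c ∈ r
      · exact Or.inl ((pv_mem_S0 u r c).2 ⟨hcr, hcu, hy'⟩)
      · have hnotS0 : c ∉ pvS0 u r := fun h => hcr ((pv_mem_S0 u r c).1 h).1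
        have hnotL1 : c ∉ pvL1 u := fun h => hy ((pv_mem_L1 u c).1 h).2
        by_cases hn : PySem.Str.startswith c "n_" = true
        · refine Or.inr (Or.inr (Or.inl ⟨(pv_mem_L2 u c).2 ⟨hcu, hn⟩, ?_⟩))
          rintro (h | h)
          · exact hnotS0 h
          · exact hnotL1 h
        · have hnotL2 : c ∉ pvL2 u := fun h => hn ((pv_mem_L2 u c).1 h).2
          by_cases hr : PySem.Str.startswith c "r_" = true
          · refine Or.inr (Or.inr (Or.inr (Or.inl ⟨(pv_mem_L3 u c).2 ⟨hcu, hr⟩, ?_⟩)))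
            rintro ((h | h) | h)
            · exact hnotS0 h
            · exact hnotL1 h
            · exact hnotL2 h
          · have hnotL3 : c ∉ pvL3 u := fun h => hr ((pv_mem_L3 u c).1 h).2
            refine Or.inr (Or.inr (Or.inr (Or.inr ⟨(pv_mem_L4 u r c).2
              ⟨hcu, hcr, hy', Bool.eq_false_iff.mpr hn, Bool.eq_false_iff.mpr hr⟩, ?_⟩)))
            rintro (((h | h) | h) | h)
            · exact hnotS0 h
            · exact hnotL1 h
            · exact hnotL2 h
            · exact hnotL3 h

lemma pv_ny (c : String) (hn : PySem.Str.startswith c "n_" = true) :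
    PySem.Str.startswith c "y_" = false := by
  cases hy : PySem.Str.startswith c "y_"
  · rfl
  · exact (pv_startswith_exclusive c 'n' 'y' (by decide) hn hy).elim

lemma pv_ry (c : String) (hr : PySem.Str.startswith c "r_" = true) :
    PySem.Str.startswith c "y_" = false := by
  cases hy : PySem.Str.startswith c "y_"
  · rfl
  · exact (pv_startswith_exclusive c 'r' 'y' (by decide) hr hy).elim

lemma pv_rn (c : String) (hr : PySem.Str.startswith c "r_" = true) :
    PySem.Str.startswith c "n_" = false := by
  cases hn : PySem.Str.startswith c "n_"
  · rfl
  · exact (pv_startswith_exclusive c 'r' 'n' (by decide) hr hn).elim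

lemma pv_notcontains (r : List String) (c : String) (h : c ∉ r) :
    PySem.Set.contains (PySem.Set.ofList r) c = false := by
  rw [Bool.eq_false_iff]
  intro hc
  exact h ((PySem.Set.mem_ofList r c).1 ((PySem.Set.contains_iff _ _).1 hc))

lemma pv_rank_req (r : List String) (c : String) (hy : PySem.Str.startswith c "y_" = false)
    (hcr : c ∈ r) : pvRank r c = (((PySem.List.index? r c).getD 0 : Nat) : Int) := by
  unfold pvRank
  rw [hy]
  rw [if_neg (by simp)]
  rw [if_pos (by rw [PySem.Set.contains_iff]; exact (PySem.Set.mem_ofList r c).2 hcr)]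

lemma pv_rank_y (r : List String) (c : String) (hy : PySem.Str.startswith c "y_" = true) :
    pvRank r c = PySem.List.len r := by
  unfold pvRank
  rw [hy, if_pos rfl]

lemma pv_rank_n (r : List String) (c : String) (hn : PySem.Str.startswith c "n_" = true)
    (hcr : c ∉ r) : pvRank r c = PySem.List.len r + 1 := by
  unfold pvRank
  rw [pv_ny c hn, if_neg (by simp), if_neg (by rw [pv_notcontains r c hcr]; simp), hn, if_pos rfl]

lemma pv_rank_r (r : List String) (c : String) (hr : PySem.Str.startswith c "r_" = true)
    (hcr : c ∉ r) : pvRank r c = PySem.List.len r + 2 := by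
  unfold pvRank
  rw [pv_ry c hr, if_neg (by simp), if_neg (by rw [pv_notcontains r c hcr]; simp),
    pv_rn c hr, if_neg (by simp), hr, if_pos rfl]

lemma pv_rank_meta (r : List String) (c : String) (hy : PySem.Str.startswith c "y_" = false)
    (hn : PySem.Str.startswith c "n_" = false) (hr : PySem.Str.startswith c "r_" = false)
    (hcr : c ∉ r) : pvRank r c = PySem.List.len r + 3 := by
  unfold pvRank
  rw [hy, if_neg (by simp), if_neg (by rw [pv_notcontains r c hcr]; simp),
    hn, if_neg (by simp), hr, if_neg (by simp)]

lemma pv_len_eq (r : List String) : PySem.List.len r = (r.length : Int) := by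
  simp [PySem.List.len]

lemma pv_rank_lt (r : List String) (c : String) (hcr : c ∈ r)
    (hy : PySem.Str.startswith c "y_" = false) : pvRank r c < PySem.List.len r := by
  rw [pv_rank_req r c hy hcr, pv_len_eq]
  exact_mod_cast pv_index_lt_length r c hcr

lemma pv_key_lt (r : List String) (a b : String)
    (h : pvRank r a < pvRank r b ∨ (pvRank r a = pvRank r b ∧ a < b)) :
    pvKey r a < pvKey r b := by
  unfold pvKey
  rw [Prod.Lex.toLex_lt_toLex]
  exact h

lemma pv_sorted_str_pairwise (xs : List String) (hx : xs.Nodup) :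
    (PySem.List.sorted xs (fun c => c)).Pairwise (fun a b => a < b) := by
  have h1 := PySem.List.sorted_pairwise xs (fun c => c)
  have h2 : (PySem.List.sorted xs (fun c => c)).Nodup :=
    ((PySem.List.sorted_perm xs (fun c => c) false).nodup_iff).2 hx
  exact (h1.and h2).imp (fun {a b} ⟨hle, hne⟩ => lt_of_le_of_ne hle hne)

lemma pv_pairwise_out (u r : List String) (hu : u.Nodup) :
    (pvOut u r).Pairwise (fun a b => pvKey r a < pvKey r b) := by
  -- rank of the elements of each segment
  have hrank0 : ∀ c ∈ pvS0 u r, pvRank r c < PySem.List.len r := by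
    intro c hc
    rcases (pv_mem_S0 u r c).1 hc with ⟨hcr, -, hy⟩
    exact pv_rank_lt r c hcr hy
  have hrank1 : ∀ c ∈ pvT (pvL1 u) (pvs1 u r), pvRank r c = PySem.List.len r := by
    intro c hc
    rcases (pv_mem_T _ _ c).1 hc with ⟨hc1, -⟩
    exact pv_rank_y r c ((pv_mem_L1 u c).1 hc1).2
  have hrank2 : ∀ c ∈ pvT (pvL2 u) (pvs2 u r), pvRank r c = PySem.List.len r + 1 := by
    intro c hc
    rcases (pv_mem_T _ _ c).1 hc with ⟨hc2, hns⟩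
    rcases (pv_mem_L2 u c).1 hc2 with ⟨hcu, hn⟩
    refine pv_rank_n r c hn (fun hcr => ?_)
    exact hns ((pv_mem_s2 u r c).2 (Or.inl ((pv_mem_S0 u r c).2 ⟨hcr, hcu, pv_ny c hn⟩)))
  have hrank3 : ∀ c ∈ pvT (pvL3 u) (pvs3 u r), pvRank r c = PySem.List.len r + 2 := by
    intro c hc
    rcases (pv_mem_T _ _ c).1 hc with ⟨hc3, hns⟩
    rcases (pv_mem_L3 u c).1 hc3 with ⟨hcu, hr⟩
    refine pv_rank_r r c hr (fun hcr => ?_)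
    exact hns ((pv_mem_s3 u r c).2 (Or.inl (Or.inl ((pv_mem_S0 u r c).2 ⟨hcr, hcu, pv_ry c hr⟩))))
  have hrank4 : ∀ c ∈ pvT (pvL4 u r) (pvs4 u r), pvRank r c = PySem.List.len r + 3 := by
    intro c hc
    rcases (pv_mem_T _ _ c).1 hc with ⟨hc4, -⟩
    rcases (pv_mem_L4 u r c).1 hc4 with ⟨-, hcr, hy, hn, hr⟩
    exact pv_rank_meta r c hy hn hr hcr
  -- pairwise inside each segment
  have hp0 : (pvS0 u r).Pairwise (fun a b => pvKey r a < pvKey r b) := by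
    have := (pv_pairwise_index_ofList r).filter
      (fun c => u.contains c && !PySem.Str.startswith c "y_")
    refine this.imp_of_mem ?_
    intro a b ha hb hab
    have ha' : a ∈ pvS0 u r := ha
    have hb' : b ∈ pvS0 u r := hb
    rcases (pv_mem_S0 u r a).1 ha' with ⟨har, -, hay⟩
    rcases (pv_mem_S0 u r b).1 hb' with ⟨hbr, -, hby⟩
    refine pv_key_lt r a b (Or.inl ?_)
    rw [pv_rank_req r a hay har, pv_rank_req r b hby hbr]
    exact_mod_cast hab
  -- generic: a filtered id-sorted segment with constant rank is key-pairwise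
  have hpT : ∀ (xs : List String) (s : PySem.Set String) (v : Int),
      (∀ c ∈ pvT (PySem.List.sorted xs (fun c => c)) s, pvRank r c = v) → xs.Nodup →
      (pvT (PySem.List.sorted xs (fun c => c)) s).Pairwise (fun a b => pvKey r a < pvKey r b) := by
    intro xs s v hv hxs
    have hpw := (pv_sorted_str_pairwise xs hxs).filter (fun c => !PySem.Set.contains s c)
    refine hpw.imp_of_mem ?_
    intro a b ha hb hab
    exact pv_key_lt r a b (Or.inr ⟨by rw [hv a ha, hv b hb], hab⟩)
  have hp1 := hpT (u.filter (fun c => PySem.Str.startswith c "y_")) (pvs1 u r) _ hrank1 (hu.filter _)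
  have hp2 := hpT (u.filter (fun c => PySem.Str.startswith c "n_")) (pvs2 u r) _ hrank2 (hu.filter _)
  have hp3 := hpT (u.filter (fun c => PySem.Str.startswith c "r_")) (pvs3 u r) _ hrank3 (hu.filter _)
  have hp4 := hpT (u.filter (fun c =>
      !PySem.Set.contains (PySem.Set.ofList r) c
      && !PySem.Str.startswith c "y_"
      && !PySem.Str.startswith c "n_"
      && !PySem.Str.startswith c "r_")) (pvs4 u r) _ hrank4 (hu.filter _)
  -- cross-segment comparisons by rank alone
  have hcross : ∀ (l1 l2 : List String), (∀ a ∈ l1, ∀ b ∈ l2, pvRank r a < pvRank r b) →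
      ∀ a ∈ l1, ∀ b ∈ l2, pvKey r a < pvKey r b := by
    intro l1 l2 h a ha b hb
    exact pv_key_lt r a b (Or.inl (h a ha b hb))
  unfold pvOut
  rw [List.pairwise_append]
  refine ⟨hp0, ?_, ?_⟩
  · rw [List.pairwise_append]
    refine ⟨hp1, ?_, ?_⟩
    · rw [List.pairwise_append]
      refine ⟨hp2, ?_, ?_⟩
      · rw [List.pairwise_append]
        refine ⟨hp3, hp4, ?_⟩
        · intro a ha b hb
          exact pv_key_lt r a b (Or.inl (by rw [hrank3 a ha, hrank4 b hb]; omega))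
      · intro a ha b hb
        rcases List.mem_append.1 hb with hb | hb
        · exact pv_key_lt r a b (Or.inl (by rw [hrank2 a ha, hrank3 b hb]; omega))
        · exact pv_key_lt r a b (Or.inl (by rw [hrank2 a ha, hrank4 b hb]; omega))
    · intro a ha b hb
      rcases List.mem_append.1 hb with hb | hb
      · exact pv_key_lt r a b (Or.inl (by rw [hrank1 a ha, hrank2 b hb]; omega))
      · rcases List.mem_append.1 hb with hb | hb
        · exact pv_key_lt r a b (Or.inl (by rw [hrank1 a ha, hrank3 b hb]; omega))
        · exact pv_key_lt r a b (Or.inl (by rw [hrank1 a ha, hrank4 b hb]; omega))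
  · intro a ha b hb
    have h0 : pvRank r a < PySem.List.len r := hrank0 a ha
    rcases List.mem_append.1 hb with hb | hb
    · exact pv_key_lt r a b (Or.inl (by rw [hrank1 b hb]; omega))
    · rcases List.mem_append.1 hb with hb | hb
      · exact pv_key_lt r a b (Or.inl (by rw [hrank2 b hb]; omega))
      · rcases List.mem_append.1 hb with hb | hb
        · exact pv_key_lt r a b (Or.inl (by rw [hrank3 b hb]; omega))
        · exact pv_key_lt r a b (Or.inl (by rw [hrank4 b hb]; omega))

-- ===== VERDICT (by name: the statement is the Claim_ definition above) =====
theorem build_canonical_schema_spec : Claim_equal_build_canonical_schema := by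
  intro u r _hdom hpre
  unfold Spec_build_canonical_schema
  rw [pv_alt_eq, pv_A_eq u r hpre]
  have hpar := pv_pairwise_out u r hpre
  have hnodup : (pvOut u r).Nodup :=
    hpar.imp (fun {a b} h => fun heq => absurd (heq ▸ h) (lt_irrefl _))
  have hperm : (pvOut u r).Perm u :=
    (List.perm_ext_iff_of_nodup hnodup hpre).2 (fun c => pv_mem_out u r c)
  exact (PySem.List.sorted_eq_of_perm_of_pairwise_lt u (pvOut u r) (pvKey r) hperm hpar).symm
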